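-- pv_equiv track=rewrite | github.com/PrincyChauhan/daily-code | diffrence.py | calculate_counters
-- ===== SOURCE A (Python) =====
-- def calculate_counters(arr):
--     n = len(arr)
--     counters = [0] * n  # Initialize counters array with zeros
--
--     for i in range(1, n):
--         counter = 0
--         for j in range(i):
--             if arr[j] > arr[i]:
--                 counter -= abs(arr[j] - arr[i])
--             else:
--                 counter += abs(arr[j] - arr[i])
--         counters[i] = counter
--
--     return counters
-- ===== SOURCE B (Python) =====
-- def calculate_counters(arr):
--     # One pass: the two branches of A both add arr[i] - arr[j], so
--     # counters[i] = i*arr[i] - sum(arr[:i]); maintain a running prefix sum.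
--     counters = []
--     prefix = 0
--     for i, x in enumerate(arr):
--         counters.append(i * x - prefix)
--         prefix += x
--     return counters
-- ===== Notes on version B (the rewrite author's own statement) =====
-- stated objective: faster
-- what changed: Replaced the quadratic nested loop (re-scanning all j<i for each i) by a single pass with a running prefix sum, using the identity counters[i] = i*arr[i] - sum(arr[:i]).
import Mathlib
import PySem

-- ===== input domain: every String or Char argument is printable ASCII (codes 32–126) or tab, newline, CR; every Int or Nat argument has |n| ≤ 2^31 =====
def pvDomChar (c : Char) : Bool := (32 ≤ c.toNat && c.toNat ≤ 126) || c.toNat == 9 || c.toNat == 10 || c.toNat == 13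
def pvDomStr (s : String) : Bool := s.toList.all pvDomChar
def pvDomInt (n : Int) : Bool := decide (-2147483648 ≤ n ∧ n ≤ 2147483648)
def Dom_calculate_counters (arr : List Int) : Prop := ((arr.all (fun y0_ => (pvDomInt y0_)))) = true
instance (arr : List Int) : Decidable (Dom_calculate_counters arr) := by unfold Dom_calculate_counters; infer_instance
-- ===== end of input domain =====

-- B replaces A's quadratic nested loop by a single prefix-sum pass (counters[i] = i*arr[i] - sum(arr[:i])); asymptotically faster.


-- ===== PORT A =====
def calculate_counters (arr : List Int) : List Int :=
  let n : Int := arr.length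
  let counters : List Int := List.replicate n.toNat 0
  (PySem.List.pyRange 1 n).foldl (fun counters i =>
    let counter :=
      (PySem.List.pyRange 0 i).foldl (fun counter j =>
        if PySem.List.pyGetD arr j 0 > PySem.List.pyGetD arr i 0 then
          counter - |PySem.List.pyGetD arr j 0 - PySem.List.pyGetD arr i 0|
        else
          counter + |PySem.List.pyGetD arr j 0 - PySem.List.pyGetD arr i 0|) 0
    counters.set i.toNat counter) counters

-- ===== PORT B =====
def calculate_counters_alt (arr : List Int) : List Int :=
  ((PySem.List.enumerate arr).foldl
    (fun (st : List Int × Int) ix => (st.1 ++ [ix.1 * ix.2 - st.2], st.2 + ix.2))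
    ([], 0)).1

-- ===== PRECONDITION & SPEC =====
def Spec_calculate_counters (arr : List Int) (out : List Int) : Prop := out = calculate_counters_alt arr
instance (arr : List Int) (out : List Int) : Decidable (Spec_calculate_counters arr out) := by unfold Spec_calculate_counters; infer_instance

-- ===== CLAIM (what is proved, stated in full; the proofs are below) =====
def Claim_equal_calculate_counters : Prop := ∀ (arr : List Int), Dom_calculate_counters arr → Spec_calculate_counters arr (calculate_counters arr)

-- ===== LEMMAS AND PROOFS =====

-- The common reference value: ref arr t = t*arr[t] - sum(arr[:t])
def pvRef (arr : List Int) (t : Nat) : Int := (t : Int) * arr.getD t 0 - (arr.take t).sum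

-- B's fold, with generalized start index and accumulators.
lemma alt_fold (l : List Int) : ∀ (k : Int) (acc : List Int) (p : Int),
    (PySem.List.enumerate l k).foldl
      (fun (st : List Int × Int) ix => (st.1 ++ [ix.1 * ix.2 - st.2], st.2 + ix.2)) (acc, p)
    = (acc ++ (List.range l.length).map (fun t => (k + t) * l.getD t 0 - (p + (l.take t).sum)),
       p + l.sum) := by
  induction l with
  | nil => intro k acc p; simp [PySem.List.enumerate]
  | cons x l ih =>
    intro k acc p
    have he : PySem.List.enumerate (x :: l) k = (k, x) :: PySem.List.enumerate l (k + 1) := by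
      simp [PySem.List.enumerate]
    rw [he, List.foldl_cons, ih (k + 1) (acc ++ [k * x - p]) (p + x)]
    refine Prod.ext ?_ (by simp [List.sum_cons]; ring)
    show (acc ++ [k * x - p]) ++ _ = _
    have hmap : (List.range (x :: l).length).map
          (fun t => (k + t) * (x :: l).getD t 0 - (p + ((x :: l).take t).sum))
        = (k * x - p) ::
          (List.range l.length).map (fun t => (k + 1 + t) * l.getD t 0 - ((p + x) + (l.take t).sum)) := by
      rw [List.length_cons, List.range_succ_eq_map, List.map_cons, List.map_map]
      refine congrArg₂ List.cons (by simp) ?_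
      refine List.map_congr_left ?_
      intro a _
      simp only [Function.comp_def, Nat.succ_eq_add_one, List.getD_cons_succ,
                 List.take_succ_cons, List.sum_cons]
      push_cast; ring
    rw [hmap, List.append_assoc, List.singleton_append]

lemma alt_eq_ref (arr : List Int) :
    calculate_counters_alt arr = (List.range arr.length).map (pvRef arr) := by
  unfold calculate_counters_alt
  rw [alt_fold arr 0 [] 0]
  simp [pvRef]

-- sum of (c - f t) over a list
lemma sum_map_sub_const (L : List Nat) (c : Int) (f : Nat → Int) :
    (L.map (fun t => c - f t)).sum = (L.length : Int) * c - (L.map f).sum := by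
  induction L with
  | nil => simp
  | cons a l ih => simp only [List.map_cons, List.sum_cons, ih, List.length_cons]; push_cast; ring

-- A's inner loop computes pvRef at index m (m ≤ arr.length).
lemma inner_eq_ref (arr : List Int) (m : Nat) (hm : m ≤ arr.length) :
    (PySem.List.pyRange 0 (m : Int)).foldl (fun counter j =>
        if PySem.List.pyGetD arr j 0 > PySem.List.pyGetD arr (m : Int) 0 then
          counter - |PySem.List.pyGetD arr j 0 - PySem.List.pyGetD arr (m : Int) 0|
        else
          counter + |PySem.List.pyGetD arr j 0 - PySem.List.pyGetD arr (m : Int) 0|) 0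
    = pvRef arr m := by
  rw [PySem.List.foldl_congr_mem _ _
        (fun counter j => counter + (PySem.List.pyGetD arr (m : Int) 0 - PySem.List.pyGetD arr j 0)) 0
        (by
          intro acc j _
          rcases le_or_gt (PySem.List.pyGetD arr j 0) (PySem.List.pyGetD arr (m : Int) 0) with h | h
          · rw [if_neg (by omega), abs_of_nonpos (by omega)]; ring
          · rw [if_pos h, abs_of_pos (by omega)]; ring)]
  rw [PySem.List.foldl_add, PySem.List.pyRange_zero_natCast, List.map_map]
  have h1 : (List.range m).map
        ((fun j => PySem.List.pyGetD arr (m : Int) 0 - PySem.List.pyGetD arr j 0) ∘ (fun k : Nat => (k : Int)))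
      = (List.range m).map (fun t => PySem.List.pyGetD arr (m : Int) 0 - arr.getD t 0) :=
    List.map_congr_left (fun t _ => by simp [PySem.List.pyGetD_natCast])
  have htake : (List.range m).map (fun t => arr.getD t 0) = arr.take m := by
    apply List.ext_getElem
    · simp [Nat.min_eq_left hm]
    · intro i h1 h2
      simp only [List.getElem_map, List.getElem_range, List.getElem_take]
      have : i < arr.length := by simp at h2; omega
      simp [List.getD, this]
  rw [h1, sum_map_sub_const, htake, List.length_range, PySem.List.pyGetD_natCast]
  simp [pvRef]

-- A's outer loop: writing g at positions k, k+1, …, k+d-1 of a list of length k+d.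
lemma outer_fold (g : Int → Int) : ∀ (d k : Nat) (cs : List Int), cs.length = k + d →
    (PySem.List.pyRange (k : Int) ((k + d : Nat) : Int)).foldl
      (fun cs i => cs.set i.toNat (g i)) cs
    = cs.take k ++ (List.range d).map (fun t => g ((k + t : Nat) : Int)) := by
  intro d
  induction d with
  | zero =>
    intro k cs h
    have hnil : PySem.List.pyRange (k : Int) ((k + 0 : Nat) : Int) = [] := by
      simp [PySem.List.pyRange]
    rw [hnil, List.foldl_nil, List.take_of_length_le (by omega), List.range_zero,
        List.map_nil, List.append_nil]
  | succ d ih =>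
    intro k cs h
    have hlt : (k : Int) < ((k + (d + 1) : Nat) : Int) := by push_cast; omega
    rw [PySem.List.pyRange_one_cons hlt, List.foldl_cons]
    have hk : k < cs.length := by omega
    have hset : (cs.set (Int.toNat k) (g k)).length = (k + 1) + d := by
      rw [List.length_set, h]; omega
    have hcast : ((k + (d + 1) : Nat) : Int) = (((k + 1) + d : Nat) : Int) := by omega
    have hk1 : ((k : Int) + 1) = (((k + 1 : Nat)) : Int) := by push_cast; ring
    rw [hcast, hk1, ih (k + 1) _ hset]
    have htk : (cs.set (Int.toNat (k : Int)) (g k)).take (k + 1) = cs.take k ++ [g ((k : Nat) : Int)] := by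
      have ht : (Int.toNat (k : Int)) = k := by omega
      rw [ht, List.take_add_one]
      simp [List.take_set, hk, List.set_eq_of_length_le]
    rw [htk, List.range_succ_eq_map, List.map_cons, List.map_map, List.append_assoc,
        List.singleton_append]
    refine congrArg (cs.take k ++ ·) (congrArg₂ List.cons ?_ ?_)
    · congr 1
      try omega
    · refine List.map_congr_left ?_
      intro t _
      simp only [Function.comp_def]
      congr 1
      try omega

lemma a_eq_ref (arr : List Int) :
    calculate_counters arr = (List.range arr.length).map (pvRef arr) := by
  unfold calculate_counters
  cases harr : arr.length with
  | zero =>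
    have hnil : arr = [] := List.eq_nil_of_length_eq_zero harr
    subst hnil
    simp [PySem.List.pyRange]
  | succ m =>
    rw [show (((m + 1 : Nat)) : Int) = ((1 + m : Nat) : Int) by push_cast; ring]
    have hrepl : (List.replicate (Int.toNat ((1 + m : Nat) : Int)) (0 : Int)).length = 1 + m := by
      simp; omega
    have h := outer_fold (fun i =>
        (PySem.List.pyRange 0 i).foldl (fun counter j =>
          if PySem.List.pyGetD arr j 0 > PySem.List.pyGetD arr i 0 then
            counter - |PySem.List.pyGetD arr j 0 - PySem.List.pyGetD arr i 0|
          else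
            counter + |PySem.List.pyGetD arr j 0 - PySem.List.pyGetD arr i 0|) 0)
        m 1 (List.replicate (Int.toNat ((1 + m : Nat) : Int)) (0 : Int)) hrepl
    refine Eq.trans h ?_
    have htk : (List.replicate (Int.toNat ((1 + m : Nat) : Int)) (0 : Int)).take 1 = [(0 : Int)] := by
      have : Int.toNat ((1 + m : Nat) : Int) = m + 1 := by omega
      rw [this, List.replicate_succ]
      simp
    rw [htk, List.range_succ_eq_map]
    simp only [List.map_cons, List.map_map, Function.comp_def, List.singleton_append]
    congr 1
    · simp [pvRef]
    · refine List.map_congr_left ?_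
      intro t ht
      have h1t : 1 + t ≤ arr.length := by
        rw [harr]; simp [List.mem_range] at ht; omega
      exact (inner_eq_ref arr (1 + t) h1t).trans (by congr 1; omega)

-- ===== VERDICT (by name: the statement is the Claim_ definition above) =====
theorem calculate_counters_spec : Claim_equal_calculate_counters := by
  intro arr _
  unfold Spec_calculate_counters
  rw [a_eq_ref, alt_eq_ref]
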